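-- pv_equiv track=rewrite | github.com/Leapense/problems | 15139번: Intelligence in Perpendicularia/test.py | generate_rectilinear_polygon
-- ===== SOURCE A (Python) =====
-- def generate_rectilinear_polygon(n):
--     if n < 4 or n % 2 != 0:
--         n = (n // 4) * 4 if n >= 4 else 4
--
--     points = []
--     x, y = 0, 0
--     step = 1
--
--     for i in range(n // 2):
--         points.append([x, y])
--         if i % 2 == 0:
--             x += step
--         else:
--             y += step
--             step += 1
--
--     for i in range(n // 2):
--         points.append([x, y])
--         if i % 2 == 0:
--             x -= step
--         else:
--             y -= step
--             step -= 1
--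
--     return points
-- ===== SOURCE B (Python) =====
-- def generate_rectilinear_polygon(n):
--     if n < 4 or n % 2 != 0:
--         n = (n // 4) * 4 if n >= 4 else 4
--
--     m = n // 2
--
--     def tri(k):
--         return k * (k + 1) // 2
--
--     # end of the outward half and its starting step, in closed form
--     X0 = tri((m + 1) // 2)
--     Y0 = tri(m // 2)
--     s0 = m // 2 + 1
--
--     def vertex(i):
--         if i < m:
--             # i-th outward vertex: growing-step prefix sums split by axis
--             return [tri((i + 1) // 2), tri(i // 2)]
--         j = i - m
--         c, d = (j + 1) // 2, j // 2
--         # j-th return vertex: subtract c (resp. d) shrinking steps starting at s0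
--         return [X0 - c * s0 + tri(c - 1), Y0 - d * s0 + tri(d - 1)]
--
--     return [vertex(i) for i in range(2 * m)]
-- ===== Notes on version B (the rewrite author's own statement) =====
-- stated objective: alternative
-- what changed: Replaces A's stateful simulation (two loops mutating x, y and a step counter while appending) by a direct closed-form formula: each vertex is computed independently from its index via triangular numbers tri(k)=k(k+1)//2, resolving the growing and shrinking step prefix sums in closed form, with no running coordinates or step variable at all.
import Mathlib
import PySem

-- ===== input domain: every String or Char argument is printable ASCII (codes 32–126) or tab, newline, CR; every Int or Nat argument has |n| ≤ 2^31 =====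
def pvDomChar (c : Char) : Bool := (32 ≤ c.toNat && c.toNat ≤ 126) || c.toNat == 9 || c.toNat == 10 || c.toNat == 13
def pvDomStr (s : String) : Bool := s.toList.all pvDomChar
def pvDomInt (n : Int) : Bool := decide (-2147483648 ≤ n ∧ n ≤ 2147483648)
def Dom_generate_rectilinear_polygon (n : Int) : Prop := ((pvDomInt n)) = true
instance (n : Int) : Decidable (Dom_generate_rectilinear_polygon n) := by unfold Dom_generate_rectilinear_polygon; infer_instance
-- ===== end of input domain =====

-- B replaces A's stateful simulation (two loops mutating x, y and a step counter) by a direct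
-- closed-form formula: vertex i is computed independently via triangular numbers; objective:
-- alternative algorithm, same cost.

-- ===== PORT A =====
-- body of A's first loop: state (points, x, y, step)
def pvA_body1 : (List (List Int) × Int × Int × Int) → Int → (List (List Int) × Int × Int × Int)
  | (pts, x, y, step), i =>
    let pts := pts ++ [[x, y]]
    if PySem.Int.mod i 2 = 0 then (pts, x + step, y, step)
    else (pts, x, y + step, step + 1)

-- body of A's second loop
def pvA_body2 : (List (List Int) × Int × Int × Int) → Int → (List (List Int) × Int × Int × Int)
  | (pts, x, y, step), i =>
    let pts := pts ++ [[x, y]]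
    if PySem.Int.mod i 2 = 0 then (pts, x - step, y, step)
    else (pts, x, y - step, step - 1)

def generate_rectilinear_polygon (n : Int) : List (List Int) :=
  let n := if n < 4 ∨ PySem.Int.mod n 2 ≠ 0 then
             (if n ≥ 4 then PySem.Int.floordiv n 4 * 4 else 4)
           else n
  let st1 := (PySem.List.pyRange 0 (PySem.Int.floordiv n 2) 1).foldl pvA_body1 ([], 0, 0, 1)
  let st2 := (PySem.List.pyRange 0 (PySem.Int.floordiv n 2) 1).foldl pvA_body2 st1
  st2.1

-- ===== PORT B =====
-- tri(k) = k*(k+1)//2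
def pvTri (k : Int) : Int := PySem.Int.floordiv (k * (k + 1)) 2

-- vertex i of the polygon, in closed form (X0, Y0, s0 precomputed from m)
def pvVertexB (m X0 Y0 s0 i : Int) : List Int :=
  if i < m then
    [pvTri (PySem.Int.floordiv (i + 1) 2), pvTri (PySem.Int.floordiv i 2)]
  else
    let j := i - m
    let c := PySem.Int.floordiv (j + 1) 2
    let d := PySem.Int.floordiv j 2
    [X0 - c * s0 + pvTri (c - 1), Y0 - d * s0 + pvTri (d - 1)]

def generate_rectilinear_polygon_alt (n : Int) : List (List Int) :=
  let n := if n < 4 ∨ PySem.Int.mod n 2 ≠ 0 then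
             (if n ≥ 4 then PySem.Int.floordiv n 4 * 4 else 4)
           else n
  let m := PySem.Int.floordiv n 2
  let X0 := pvTri (PySem.Int.floordiv (m + 1) 2)
  let Y0 := pvTri (PySem.Int.floordiv m 2)
  let s0 := PySem.Int.floordiv m 2 + 1
  (PySem.List.pyRange 0 (2 * m) 1).map (pvVertexB m X0 Y0 s0)

-- ===== PRECONDITION & SPEC =====
def Spec_generate_rectilinear_polygon (n : Int) (out : List (List Int)) : Prop := out = generate_rectilinear_polygon_alt n
instance (n : Int) (out : List (List Int)) : Decidable (Spec_generate_rectilinear_polygon n out) := by unfold Spec_generate_rectilinear_polygon; infer_instance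

-- ===== CLAIM (what is proved, stated in full; the proofs are below) =====
def Claim_equal_generate_rectilinear_polygon : Prop := ∀ (n : Int), Dom_generate_rectilinear_polygon n → Spec_generate_rectilinear_polygon n (generate_rectilinear_polygon n)

-- ===== LEMMAS AND PROOFS =====

lemma pvTri_succ (k : Int) : pvTri (k + 1) = pvTri k + (k + 1) := by
  unfold pvTri
  rw [PySem.Int.floordiv_eq_ediv_of_pos (by norm_num), PySem.Int.floordiv_eq_ediv_of_pos (by norm_num)]
  obtain ⟨r, hr⟩ := Int.even_mul_succ_self k
  obtain ⟨s, hs⟩ := Int.even_mul_succ_self (k + 1)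
  rw [hr, hs, show s + s = 2 * s from by ring, show r + r = 2 * r from by ring,
      Int.mul_ediv_cancel_left _ (by norm_num), Int.mul_ediv_cancel_left _ (by norm_num)]
  have key : s + s = r + r + (2 * k + 2) := by linear_combination (-1 : Int) * hs + hr
  omega

lemma pvTri_pred (k : Int) : pvTri k = pvTri (k - 1) + k := by
  have h := pvTri_succ (k - 1)
  simpa using h

lemma pv_mod2 (k : Nat) : PySem.Int.mod (k : Int) 2 = ((k % 2 : Nat) : Int) := by
  exact_mod_cast PySem.Int.mod_natCast k 2

lemma pv_div2 (k : Nat) : PySem.Int.floordiv (k : Int) 2 = ((k / 2 : Nat) : Int) := by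
  exact_mod_cast PySem.Int.floordiv_natCast k 2

-- closed form of A's first loop: state after k iterations
lemma pv_loop1 (k : Nat) :
    ((List.range k).map (fun j : Nat => (j : Int))).foldl pvA_body1 ([], 0, 0, 1)
    = ((List.range k).map
         (fun j : Nat => [pvTri (((j + 1) / 2 : Nat) : Int), pvTri ((j / 2 : Nat) : Int)]),
       pvTri ((((k + 1) / 2 : Nat)) : Int), pvTri (((k / 2 : Nat)) : Int),
       ((k / 2 : Nat) : Int) + 1) := by
  induction k with
  | zero => simp [pvTri, PySem.Int.floordiv]
  | succ k ih =>
    rw [List.range_succ, List.map_append, List.foldl_append, ih]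
    simp only [List.map_append, List.map_cons, List.map_nil, List.foldl_cons, List.foldl_nil,
      pvA_body1, pv_mod2]
    rcases Nat.even_or_odd k with ⟨t, ht⟩ | ⟨t, ht⟩
    · subst ht
      rw [show (t + t) % 2 = 0 from by omega, show (t + t + 1) / 2 = t from by omega,
          show (t + t) / 2 = t from by omega, show (t + t + 1 + 1) / 2 = t + 1 from by omega]
      simp only [Nat.cast_zero, Nat.cast_add, Nat.cast_one, if_true]
      rw [pvTri_succ]
    · subst ht
      rw [show (2 * t + 1) % 2 = 1 from by omega, show (2 * t + 1 + 1) / 2 = t + 1 from by omega,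
          show (2 * t + 1) / 2 = t from by omega, show (2 * t + 1 + 1 + 1) / 2 = t + 1 from by omega]
      simp only [Nat.cast_add, Nat.cast_one]
      rw [if_neg (by norm_num), pvTri_succ]

-- closed form of A's second loop: state after k iterations from (pts, X0, Y0, s0)
lemma pv_loop2 (X0 Y0 s0 : Int) (pts : List (List Int)) (k : Nat) :
    ((List.range k).map (fun j : Nat => (j : Int))).foldl pvA_body2 (pts, X0, Y0, s0)
    = (pts ++ (List.range k).map (fun j : Nat =>
          [X0 - (((j + 1) / 2 : Nat) : Int) * s0 + pvTri ((((j + 1) / 2 : Nat) : Int) - 1),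
           Y0 - ((j / 2 : Nat) : Int) * s0 + pvTri (((j / 2 : Nat) : Int) - 1)]),
       X0 - (((k + 1) / 2 : Nat) : Int) * s0 + pvTri ((((k + 1) / 2 : Nat) : Int) - 1),
       Y0 - ((k / 2 : Nat) : Int) * s0 + pvTri (((k / 2 : Nat) : Int) - 1),
       s0 - ((k / 2 : Nat) : Int)) := by
  induction k with
  | zero => simp [pvTri, PySem.Int.floordiv]
  | succ k ih =>
    rw [List.range_succ, List.map_append, List.foldl_append, ih]
    simp only [List.map_append, List.map_cons, List.map_nil, List.foldl_cons, List.foldl_nil,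
      pvA_body2, pv_mod2]
    rcases Nat.even_or_odd k with ⟨t, ht⟩ | ⟨t, ht⟩
    · subst ht
      rw [show (t + t) % 2 = 0 from by omega, show (t + t + 1) / 2 = t from by omega,
          show (t + t) / 2 = t from by omega, show (t + t + 1 + 1) / 2 = t + 1 from by omega]
      simp only [Nat.cast_zero, Nat.cast_add, Nat.cast_one, if_true]
      rw [show ((t : Int) + 1 - 1) = (t : Int) from by ring, pvTri_pred ((t : Int))]
      simp only [Prod.mk.injEq]
      exact ⟨List.append_assoc _ _ _, by ring, trivial⟩
    · subst ht
      rw [show (2 * t + 1) % 2 = 1 from by omega, show (2 * t + 1 + 1) / 2 = t + 1 from by omega,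
          show (2 * t + 1) / 2 = t from by omega, show (2 * t + 1 + 1 + 1) / 2 = t + 1 from by omega]
      simp only [Nat.cast_add, Nat.cast_one]
      rw [if_neg (by norm_num), show ((t : Int) + 1 - 1) = (t : Int) from by ring,
          pvTri_pred ((t : Int))]
      simp only [Prod.mk.injEq]
      exact ⟨List.append_assoc _ _ _, trivial, by ring, by ring⟩

-- the two sides agree for any m
lemma pv_core (m : Int) :
    ((PySem.List.pyRange 0 m 1).foldl pvA_body2
        ((PySem.List.pyRange 0 m 1).foldl pvA_body1 ([], 0, 0, 1))).1
    = (PySem.List.pyRange 0 (2 * m) 1).map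
        (pvVertexB m (pvTri (PySem.Int.floordiv (m + 1) 2))
          (pvTri (PySem.Int.floordiv m 2)) (PySem.Int.floordiv m 2 + 1)) := by
  by_cases h : 0 ≤ m
  · obtain ⟨a, rfl⟩ : ∃ a : Nat, m = (a : Int) := ⟨m.toNat, by omega⟩
    rw [PySem.List.pyRange_one, PySem.List.pyRange_one]
    simp only [sub_zero, zero_add]
    have h2a : ((2 * (a : Int)).toNat) = a + a := by omega
    have hat : (((a : Int)).toNat) = a := by omega
    rw [h2a, hat, pv_loop1, pv_loop2]
    dsimp only
    rw [List.range_add, List.map_append, List.map_append]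
    simp only [List.map_map]
    congr 1
    · -- first halves agree
      refine List.map_congr_left ?_
      intro i hi
      have him : i < a := List.mem_range.mp hi
      simp only [Function.comp_apply, pvVertexB]
      rw [if_pos (by exact_mod_cast him)]
      rw [show ((i : Int) + 1) = ((i + 1 : Nat) : Int) from by push_cast; ring, pv_div2, pv_div2]
    · -- second halves agree
      refine List.map_congr_left ?_
      intro j hj
      simp only [Function.comp_apply, pvVertexB]
      rw [if_neg (by push_cast; omega)]
      have hj1 : (((a + j : Nat) : Int)) - (a : Int) = (j : Int) := by push_cast; ring
      simp only [hj1]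
      rw [show ((j : Int) + 1) = ((j + 1 : Nat) : Int) from by push_cast; ring, pv_div2, pv_div2,
          show ((a : Int) + 1) = ((a + 1 : Nat) : Int) from by push_cast; ring, pv_div2, pv_div2]
  · rw [PySem.List.pyRange_one_eq_nil (by omega), PySem.List.pyRange_one_eq_nil (by omega)]
    simp

lemma pv_main (n : Int) :
    generate_rectilinear_polygon n = generate_rectilinear_polygon_alt n := by
  unfold generate_rectilinear_polygon generate_rectilinear_polygon_alt
  exact pv_core (PySem.Int.floordiv (if n < 4 ∨ PySem.Int.mod n 2 ≠ 0 then
      (if n ≥ 4 then PySem.Int.floordiv n 4 * 4 else 4) else n) 2)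

-- ===== VERDICT (by name: the statement is the Claim_ definition above) =====
theorem generate_rectilinear_polygon_spec : Claim_equal_generate_rectilinear_polygon := by
  intro n _
  unfold Spec_generate_rectilinear_polygon
  exact pv_main n
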